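-- pv_equiv track=rewrite | github.com/costa-nus/ai-on-cs-edu | scripts/fetch_university_data.py | _xlsx_col_index
-- ===== SOURCE A (Python) =====
-- def _xlsx_col_index(cell_ref: str) -> int:
--     letters = ""
--     for ch in cell_ref:
--         if ch.isalpha():
--             letters += ch
--         else:
--             break
--     n = 0
--     for ch in letters:
--         n = n * 26 + (ord(ch) - ord("A") + 1)
--     return n - 1
-- ===== SOURCE B (Python) =====
-- def _xlsx_col_index(cell_ref: str) -> int:
--     end = 0
--     while end < len(cell_ref) and cell_ref[end].isalpha():
--         end += 1
--     total = 0
--     weight = 1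
--     for ch in reversed(cell_ref[:end]):
--         total += (ord(ch) - ord("A") + 1) * weight
--         weight *= 26
--     return total - 1
-- ===== Notes on version B (the rewrite author's own statement) =====
-- stated objective: alternative
-- what changed: The alphabetic prefix is located by an index-advancing while loop and sliced off instead of string concatenation, and the index is computed as a right-to-left positional power-of-26 sum over the reversed prefix instead of left-to-right Horner evaluation.
import Mathlib
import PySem

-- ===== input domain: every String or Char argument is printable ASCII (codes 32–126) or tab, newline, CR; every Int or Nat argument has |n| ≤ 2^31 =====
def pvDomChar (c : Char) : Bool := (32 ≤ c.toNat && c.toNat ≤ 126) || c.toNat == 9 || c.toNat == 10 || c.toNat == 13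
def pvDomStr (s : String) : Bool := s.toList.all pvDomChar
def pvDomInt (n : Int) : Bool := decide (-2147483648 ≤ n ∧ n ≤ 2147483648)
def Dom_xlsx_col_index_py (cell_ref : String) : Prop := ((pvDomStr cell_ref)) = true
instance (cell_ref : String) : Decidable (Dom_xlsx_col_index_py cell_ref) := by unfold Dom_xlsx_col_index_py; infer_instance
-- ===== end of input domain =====

-- B replaces A's string-concatenation prefix loop by an index/slice scan and Horner evaluation by a reversed power-of-26 positional sum (objective: alternative decomposition).

-- ===== PORT A =====
-- the first loop of A: accumulate alphabetic chars, break at the first non-alpha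
def pvA_letters : List Char → List Char
  | [] => []
  | c :: cs => if PySem.Chars.isalpha c then c :: pvA_letters cs else []

def xlsx_col_index_py (cell_ref : String) : Int :=
  let letters := pvA_letters cell_ref.toList
  let n := letters.foldl (fun n c => n * 26 + ((c.toNat : Int) - 65 + 1)) 0
  n - 1

-- ===== PORT B =====
-- Source B's while loop: count of leading alphabetic characters (the final value of `end`)
def pvB_end : List Char → Nat
  | [] => 0
  | c :: cs => if PySem.Chars.isalpha c then pvB_end cs + 1 else 0

def xlsx_col_index_py_alt (cell_ref : String) : Int :=
  let cs := cell_ref.toList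
  let pref := cs.take (pvB_end cs)   -- cell_ref[:end]
  let r := pref.reverse.foldl
    (fun (tw : Int × Int) c => (tw.1 + ((c.toNat : Int) - 65 + 1) * tw.2, tw.2 * 26)) (0, 1)
  r.1 - 1

-- ===== PRECONDITION & SPEC =====
def Spec_xlsx_col_index_py (cell_ref : String) (out : Int) : Prop := out = xlsx_col_index_py_alt cell_ref
instance (cell_ref : String) (out : Int) : Decidable (Spec_xlsx_col_index_py cell_ref out) := by unfold Spec_xlsx_col_index_py; infer_instance

-- ===== CLAIM (what is proved, stated in full; the proofs are below) =====
def Claim_equal_xlsx_col_index_py : Prop := ∀ (cell_ref : String), Dom_xlsx_col_index_py cell_ref → Spec_xlsx_col_index_py cell_ref (xlsx_col_index_py cell_ref)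

-- ===== LEMMAS AND PROOFS =====

-- both prefix computations yield the same list
lemma pv_prefix_eq (l : List Char) : l.take (pvB_end l) = pvA_letters l := by
  induction l with
  | nil => rfl
  | cons c cs ih =>
    simp only [pvB_end, pvA_letters]
    by_cases h : PySem.Chars.isalpha c <;> simp [h, ih]

def pvV (c : Char) : Int := (c.toNat : Int) - 65 + 1

lemma pv_horner_shift (l : List Char) (n : Int) :
    l.foldl (fun n c => n * 26 + pvV c) n
      = n * 26 ^ l.length + l.foldl (fun n c => n * 26 + pvV c) 0 := by
  induction l generalizing n with
  | nil => simp
  | cons c cs ih =>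
    simp only [List.foldl_cons, List.length_cons]
    rw [ih (n * 26 + pvV c), ih (0 * 26 + pvV c)]
    ring

lemma pv_rev_snd (m : List Char) (t w : Int) :
    (m.foldl (fun (tw : Int × Int) c => (tw.1 + pvV c * tw.2, tw.2 * 26)) (t, w)).2
      = w * 26 ^ m.length := by
  induction m generalizing t w with
  | nil => simp
  | cons c cs ih =>
    simp only [List.foldl_cons]
    rw [ih (t + pvV c * w) (w * 26), List.length_cons]
    ring

lemma pv_rev_fst (l : List Char) (t w : Int) :
    (l.reverse.foldl (fun (tw : Int × Int) c => (tw.1 + pvV c * tw.2, tw.2 * 26)) (t, w)).1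
      = t + w * l.foldl (fun n c => n * 26 + pvV c) 0 := by
  induction l generalizing t w with
  | nil => simp
  | cons c cs ih =>
    simp only [List.reverse_cons, List.foldl_append, List.foldl_cons, List.foldl_nil,
      List.foldl_cons]
    have h2 := pv_rev_snd cs.reverse t w
    rcases he : cs.reverse.foldl (fun (tw : Int × Int) c => (tw.1 + pvV c * tw.2, tw.2 * 26)) (t, w)
      with ⟨t', w'⟩
    have hf : t' = t + w * cs.foldl (fun n c => n * 26 + pvV c) 0 := by
      have := ih t w; rw [he] at this; exact this
    have hw : w' = w * 26 ^ cs.length := by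
      rw [he] at h2; simpa using h2
    rw [hf, hw, pv_horner_shift cs (0 * 26 + pvV c)]
    ring

-- ===== VERDICT (by name: the statement is the Claim_ definition above) =====
theorem xlsx_col_index_py_spec : Claim_equal_xlsx_col_index_py := by
  intro s _
  show xlsx_col_index_py s = xlsx_col_index_py_alt s
  unfold xlsx_col_index_py xlsx_col_index_py_alt
  simp only [pv_prefix_eq]
  have h := pv_rev_fst (pvA_letters s.toList) 0 1
  simp only [pvV] at h
  rw [h]
  ring
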